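-- pv_equiv track=rewrite | github.com/Zayakind/learn_development | eight_algoritms/massdriver.py | massdriver
-- ===== SOURCE A (Python) =====
-- def massdriver(activate: list[int]):
--     nums = {}
--     len_activate = len(activate)
--
--     for i, num in enumerate(activate):
--         if num in nums:
--             if nums[num] < len_activate:
--                 len_activate = nums[num]
--             continue
--         nums[num] = i
--     if len_activate == len(activate):
--         return -1
--     return len_activate
-- ===== SOURCE B (Python) =====
-- def massdriver(activate: list[int]):
--     # phase 1: full frequency table
--     cnt = {}
--     for num in activate:
--         cnt[num] = cnt.get(num, 0) + 1
--     # phase 2: first index whose value is duplicated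
--     for i, num in enumerate(activate):
--         if cnt[num] > 1:
--             return i
--     return -1
-- ===== Notes on version B (the rewrite author's own statement) =====
-- stated objective: simpler
-- what changed: Replaced A's single pass that tracks first-occurrence indices in a dict and maintains a running minimum (compared against len) by a two-phase decomposition: build a full frequency table, then a separate early-return scan for the first index whose value is duplicated.
import Mathlib
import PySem

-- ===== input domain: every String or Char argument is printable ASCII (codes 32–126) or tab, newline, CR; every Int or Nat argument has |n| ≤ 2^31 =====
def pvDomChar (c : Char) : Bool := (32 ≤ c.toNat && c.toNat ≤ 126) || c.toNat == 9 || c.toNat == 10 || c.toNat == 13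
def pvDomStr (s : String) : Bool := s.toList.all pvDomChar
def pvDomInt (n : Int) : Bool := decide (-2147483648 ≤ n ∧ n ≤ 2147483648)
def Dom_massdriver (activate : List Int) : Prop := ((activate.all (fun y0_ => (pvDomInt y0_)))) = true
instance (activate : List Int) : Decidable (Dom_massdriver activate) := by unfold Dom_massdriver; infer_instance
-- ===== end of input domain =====

-- B replaces A's one-pass running-min over first-occurrence indices by a two-phase
-- build-frequency-table-then-scan decomposition (objective: simpler).

-- ===== PORT A =====
-- one loop step: `if num in nums: if nums[num] < len_activate: len_activate = nums[num]; continue` / `nums[num] = i`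
def mdStep (st : PySem.Dict Int Int × Int) (p : Int × Int) : PySem.Dict Int Int × Int :=
  match st.1.get? p.2 with
  | some j => if j < st.2 then (st.1, j) else st
  | none => (st.1.insert p.2 p.1, st.2)

def massdriver (activate : List Int) : Int :=
  let st := (PySem.List.enumerate activate).foldl mdStep (PySem.Dict.empty, (activate.length : Int))
  if st.2 = (activate.length : Int) then -1 else st.2

-- ===== PORT B =====
-- phase 1: cnt[num] = cnt.get(num, 0) + 1 over the whole list
def mdCount (activate : List Int) : PySem.Dict Int Int :=
  activate.foldl (fun cnt num => cnt.insert num (cnt.getD num 0 + 1)) PySem.Dict.empty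

-- phase 2: `for i, num in enumerate(activate): if cnt[num] > 1: return i` / `return -1`
-- (cnt[num] read as getD _ 0: every scanned num is a key of cnt, so the default is never used)
def mdScan (cnt : PySem.Dict Int Int) : List (Int × Int) → Int
  | [] => -1
  | p :: rest => if 1 < cnt.getD p.2 0 then p.1 else mdScan cnt rest

def massdriver_alt (activate : List Int) : Int :=
  mdScan (mdCount activate) (PySem.List.enumerate activate)

-- ===== PRECONDITION & SPEC =====
def Spec_massdriver (activate : List Int) (out : Int) : Prop := out = massdriver_alt activate
instance (activate : List Int) (out : Int) : Decidable (Spec_massdriver activate out) := by unfold Spec_massdriver; infer_instance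

-- ===== CLAIM (what is proved, stated in full; the proofs are below) =====
def Claim_equal_massdriver : Prop := ∀ (activate : List Int), Dom_massdriver activate → Spec_massdriver activate (massdriver activate)

-- ===== LEMMAS AND PROOFS =====

-- common reference value: first index whose value is duplicated in xs, else -1
def mdSpec (xs : List Int) : Int :=
  match xs.findIdx? (fun v => decide (1 < xs.count v)) with
  | some i => (i : Int)
  | none => -1

-- A's running minimum after processing prefix `pre`, full length n
def laOf (pre : List Int) (n : Nat) : Int :=
  match pre.findIdx? (fun v => decide (1 < pre.count v)) with
  | some i => (i : Int)
  | none => (n : Int)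

theorem findIdx?_congr_mem {α : Type} (l : List α) (p q : α → Bool)
    (h : ∀ v ∈ l, p v = q v) : l.findIdx? p = l.findIdx? q := by
  induction l with
  | nil => rfl
  | cons a l ih =>
    simp only [List.findIdx?_cons, h a (by simp)]
    rw [ih (fun v hv => h v (by simp [hv]))]

theorem findIdx?_or_eq (x : Int) (p : Int → Bool) :
    ∀ (pre : List Int) (j : Nat), pre.findIdx? (· == x) = some j →
    pre.findIdx? (fun v => p v || (v == x)) =
      some (match pre.findIdx? p with | some i => min i j | none => j) := by
  intro pre
  induction pre with
  | nil => intro j h; simp at h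
  | cons a pre ih =>
    intro j h
    simp only [List.findIdx?_cons] at h ⊢
    by_cases hpa : p a = true
    · simp only [hpa, Bool.true_or, if_true]
      cases hp : pre.findIdx? p <;> simp [hpa, hp, Nat.zero_min]
    · by_cases hax : (a == x) = true
      · simp only [hax, if_true] at h
        cases h
        simp only [hpa, hax, Bool.false_or, Bool.or_true, if_true]
        cases hp : pre.findIdx? p <;> simp [hpa, hp]
      · cases hrec : pre.findIdx? (· == x) with
        | none => simp [hax, hrec] at h
        | some j' =>
          simp only [hrec] at h
          simp [hax] at h
          subst h
          cases hp : pre.findIdx? p with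
          | none => simp [hpa, hax, hp, ih j' hrec]
          | some i => simp [hpa, hax, hp, ih j' hrec, Nat.succ_min_succ]

-- x not yet seen: the running minimum is unchanged
theorem laOf_append_not_mem (pre : List Int) (x : Int) (n : Nat) (hx : x ∉ pre) :
    laOf (pre ++ [x]) n = laOf pre n := by
  unfold laOf
  have hc : List.count x (pre ++ [x]) = 1 := by
    simp [List.count_append, List.count_eq_zero.mpr hx]
  have hx1 : List.findIdx? (fun v => decide (1 < List.count v (pre ++ [x]))) [x] = none := by
    simp [List.findIdx?_cons, hc, hx]
  have hcong : List.findIdx? (fun v => decide (1 < List.count v (pre ++ [x]))) pre =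
      List.findIdx? (fun v => decide (1 < List.count v pre)) pre := by
    apply findIdx?_congr_mem
    intro v hv
    have hvx : v ≠ x := fun e => hx (e ▸ hv)
    simp [List.count_append, List.count_singleton, hvx, Ne.symm hvx]
  rw [List.findIdx?_append, hx1, hcong]
  cases pre.findIdx? (fun v => decide (1 < List.count v pre)) <;> simp

-- x seen before at index j: the running minimum becomes min with j
theorem laOf_append_mem (pre : List Int) (x : Int) (n : Nat) (j : Nat)
    (hj : pre.findIdx? (· == x) = some j) (hn : pre.length < n) :
    laOf (pre ++ [x]) n = if (j : Int) < laOf pre n then (j : Int) else laOf pre n := by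
  have hjlt : j < pre.length := (List.findIdx?_eq_some_iff_findIdx_eq.mp hj).1
  have hxmem : x ∈ pre := by
    obtain ⟨hlt, hp, -⟩ := List.findIdx?_eq_some_iff_getElem.mp hj
    simp at hp
    exact hp ▸ pre.getElem_mem hlt
  unfold laOf
  have hcong : List.findIdx? (fun v => decide (1 < List.count v (pre ++ [x]))) pre =
      List.findIdx? (fun v => decide (1 < List.count v pre) || (v == x)) pre := by
    apply findIdx?_congr_mem
    intro v hv
    by_cases hvx : v = x
    · subst hvx
      have h1 : 1 ≤ List.count v pre := List.count_pos_iff.mpr hv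
      have h2 : 1 < List.count v (pre ++ [v]) := by
        simp [List.count_append]; omega
      simp [h2, hv]
    · have hxv : x ≠ v := fun e => hvx e.symm
      simp [List.count_append, List.count_singleton, hxv, hvx]
  have hor := findIdx?_or_eq x (fun v => decide (1 < List.count v pre)) pre j hj
  rw [List.findIdx?_append, hcong, hor]
  cases hp : pre.findIdx? (fun v => decide (1 < List.count v pre)) with
  | none =>
    have hjn : (j : Int) < (n : Int) := by exact_mod_cast lt_of_lt_of_le hjlt (le_of_lt hn)
    simp [hjn]
  | some i =>
    by_cases hji : (j : Int) < (i : Int)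
    · have hm : min i j = j := by
        have : j < i := by exact_mod_cast hji
        omega
      simp [hm, hji]
    · have hm : min i j = i := by
        have : i ≤ j := by exact_mod_cast not_lt.mp hji
        omega
      simp [hm, hji]

theorem findIdx?_append_eq_of_mem (pre : List Int) (x : Int) (j : Nat)
    (hnx : pre.findIdx? (· == x) = some j) :
    ∀ v, (pre ++ [x]).findIdx? (· == v) = pre.findIdx? (· == v) := by
  intro v
  rw [List.findIdx?_append]
  cases hv : pre.findIdx? (· == v) with
  | some i => rfl
  | none =>
    have hvx : (x == v) = false := by
      by_cases e : x = v
      · subst e; rw [hv] at hnx; cases hnx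
      · simp [e]
    simp [List.findIdx?_cons, hvx]

theorem A_inv : ∀ (suf pre : List Int) (nums : PySem.Dict Int Int) (n : Nat),
    pre.length + suf.length ≤ n →
    (∀ v, nums.get? v = (pre.findIdx? (· == v)).map (fun k => (k : Int))) →
    ((PySem.List.enumerate suf (pre.length : Int)).foldl mdStep (nums, laOf pre n)).2 =
      laOf (pre ++ suf) n := by
  intro suf
  induction suf with
  | nil => intro pre nums n _ _; simp [PySem.List.enumerate_nil]
  | cons x r ih =>
    intro pre nums n hlen hnums
    have hlen' : pre.length < n := by simp at hlen; omega
    rw [PySem.List.enumerate_cons, List.foldl_cons]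
    have hcast : ((pre.length : Int) + 1) = (((pre ++ [x]).length : Nat) : Int) := by
      simp
    cases hnx : pre.findIdx? (· == x) with
    | some j =>
      have hla := laOf_append_mem pre x n j hnx hlen'
      have hstep : mdStep (nums, laOf pre n) ((pre.length : Int), x) = (nums, laOf (pre ++ [x]) n) := by
        have hg : nums.get? x = some (j : Int) := by rw [hnums x, hnx]; rfl
        simp only [mdStep, hg]
        rw [hla]
        split_ifs <;> rfl
      rw [hstep, hcast]
      have := ih (pre ++ [x]) nums n (by simp at hlen ⊢; omega)
        (fun v => by rw [hnums v, findIdx?_append_eq_of_mem pre x j hnx v])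
      rw [this, List.append_assoc]
      rfl
    | none =>
      have hxnotmem : x ∉ pre := by
        intro hmem
        rw [List.findIdx?_eq_none_iff] at hnx
        exact absurd (hnx x hmem) (by simp)
      have hla := laOf_append_not_mem pre x n hxnotmem
      have hstep : mdStep (nums, laOf pre n) ((pre.length : Int), x) =
          (nums.insert x (pre.length : Int), laOf (pre ++ [x]) n) := by
        have hg : nums.get? x = none := by rw [hnums x, hnx]; rfl
        simp only [mdStep, hg, hla]
      rw [hstep, hcast]
      have hnums' : ∀ v, (nums.insert x (pre.length : Int)).get? v =
          ((pre ++ [x]).findIdx? (· == v)).map (fun k => (k : Int)) := by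
        intro v
        by_cases e : x = v
        · subst e
          rw [PySem.Dict.get?_insert_self, List.findIdx?_append, hnx]
          simp [List.findIdx?_cons]
        · rw [PySem.Dict.get?_insert_of_ne nums _ (show v ≠ x from fun h => e h.symm), hnums v,
            List.findIdx?_append]
          cases hv : pre.findIdx? (· == v) with
          | some i => rfl
          | none => simp [List.findIdx?_cons, e]
      have := ih (pre ++ [x]) (nums.insert x (pre.length : Int)) n (by simp at hlen ⊢; omega) hnums'
      rw [this, List.append_assoc]
      rfl

theorem B_scan (cnt : PySem.Dict Int Int) :
    ∀ (l : List Int) (s : Int), mdScan cnt (PySem.List.enumerate l s) =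
      match l.findIdx? (fun v => decide (1 < cnt.getD v 0)) with
      | some i => s + (i : Int)
      | none => -1 := by
  intro l
  induction l with
  | nil => intro s; simp [PySem.List.enumerate_nil, mdScan]
  | cons a l ih =>
    intro s
    rw [PySem.List.enumerate_cons]
    simp only [mdScan, List.findIdx?_cons]
    by_cases hpa : 1 < cnt.getD a 0
    · simp [hpa]
    · rw [if_neg hpa, ih (s + 1)]
      simp only [hpa, decide_false, if_false]
      cases hf : l.findIdx? (fun v => decide (1 < cnt.getD v 0)) with
      | none => simp
      | some i => simp; push_cast; ring

-- ===== VERDICT (by name: the statement is the Claim_ definition above) =====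
theorem massdriver_spec : Claim_equal_massdriver := by
  unfold Claim_equal_massdriver
  intro xs _
  unfold Spec_massdriver
  have hA : massdriver xs = mdSpec xs := by
    unfold massdriver
    have h0 : laOf [] xs.length = (xs.length : Int) := by simp [laOf]
    have hinv := A_inv xs [] PySem.Dict.empty xs.length (by simp)
      (fun v => by simp [PySem.Dict.get?, PySem.Dict.empty])
    simp only [List.length_nil, Int.natCast_zero, h0, List.nil_append] at hinv
    simp only [hinv]
    unfold mdSpec laOf
    cases hf : xs.findIdx? (fun v => decide (1 < List.count v xs)) with
    | none => simp
    | some i =>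
      have hi : i < xs.length := (List.findIdx?_eq_some_iff_findIdx_eq.mp hf).1
      have : ((i : Int)) ≠ (xs.length : Int) := by exact_mod_cast Nat.ne_of_lt hi
      simp [this]
  have hB : massdriver_alt xs = mdSpec xs := by
    unfold massdriver_alt mdCount
    rw [PySem.Dict.foldl_insert_getD_add_one_eq_counter]
    rw [show PySem.List.enumerate xs = PySem.List.enumerate xs 0 from rfl, B_scan]
    have hpred : (fun v => decide (1 < (PySem.Dict.counter xs).getD v 0)) =
        (fun v => decide (1 < List.count v xs)) := by
      funext v
      rw [PySem.Dict.getD_counter]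
      simp
    rw [hpred]
    unfold mdSpec
    cases hf : xs.findIdx? (fun v => decide (1 < List.count v xs)) <;> simp
  rw [hA, hB]
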